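-- pv_equiv track=rewrite | github.com/PauloHFS/data-structures-and-algorithms | algorithms/binary-timer/main.py | bitToDec
-- ===== SOURCE A (Python) =====
-- def bitToDec(bits):
--     h = 0
--     for i in range(0, 4):
--         if bits[i] == 1:
--             h += 2**(3 - i)
--
--     m = 0
--     for i in range(4, 9):
--         if bits[i] == 1:
--             m += 2**(8-i)
--
--     return f'{h}:{m}' if m > 9 else f'{h}:0{m}'
-- ===== SOURCE B (Python) =====
-- def bitToDec(bits):
--     b0, b1, b2, b3, b4, b5, b6, b7, b8 = bits[:9]
--     h = 0
--     for bit in (b0, b1, b2, b3):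
--         h = h * 2 + (1 if bit == 1 else 0)
--     m = 0
--     for bit in (b4, b5, b6, b7, b8):
--         m = m * 2 + (1 if bit == 1 else 0)
--     return f'{h}:{m}' if m > 9 else f'{h}:0{m}'
-- ===== Notes on version B (the rewrite author's own statement) =====
-- stated objective: alternative
-- what changed: Replaces the two index-and-power-of-two summation loops with a single tuple-unpack of bits[:9] followed by Horner folds (acc*2 + bit) over the hour and minute bit groups, with no indexing and no 2**k terms.
import Mathlib
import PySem

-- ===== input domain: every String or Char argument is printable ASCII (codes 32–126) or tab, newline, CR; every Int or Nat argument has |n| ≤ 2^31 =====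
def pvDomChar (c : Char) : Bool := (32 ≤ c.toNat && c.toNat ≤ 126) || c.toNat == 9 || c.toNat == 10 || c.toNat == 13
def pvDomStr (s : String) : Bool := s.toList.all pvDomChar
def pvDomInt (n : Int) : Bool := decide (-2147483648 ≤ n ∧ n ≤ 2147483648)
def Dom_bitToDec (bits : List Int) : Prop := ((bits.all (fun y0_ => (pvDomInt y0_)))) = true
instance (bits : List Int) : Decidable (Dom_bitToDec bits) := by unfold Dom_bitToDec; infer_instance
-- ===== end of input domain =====

-- B replaces A's indexed power-of-two summation loops by Horner folds over the slices bits[0:4] and bits[4:9] (alternative decomposition, same cost).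

-- ===== PORT A =====
-- 2**(3-i) / 2**(8-i): the exponent is nonnegative for every i the range yields, so .toNat is exact here.
def bitToDec (bits : List Int) : String :=
  let h := (PySem.List.pyRange 0 4 1).foldl
    (fun h i => if PySem.List.pyGetD bits i 0 == 1 then h + 2 ^ ((3 : Int) - i).toNat else h) (0 : Int)
  let m := (PySem.List.pyRange 4 9 1).foldl
    (fun m i => if PySem.List.pyGetD bits i 0 == 1 then m + 2 ^ ((8 : Int) - i).toNat else m) (0 : Int)
  if m > 9 then PySem.Int.toStr h ++ ":" ++ PySem.Int.toStr m
  else PySem.Int.toStr h ++ ":0" ++ PySem.Int.toStr m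

-- ===== PORT B =====
-- the unpacking 'b0, …, b8 = bits[:9]' raises ValueError when fewer than 9 values arrive; Python raises there
-- (outside Pre_), so the fallback branch returns a dummy "".
def bitToDec_alt (bits : List Int) : String :=
  match PySem.List.slice bits none (some 9) with
  | [b0, b1, b2, b3, b4, b5, b6, b7, b8] =>
    let h := [b0, b1, b2, b3].foldl (fun h bit => h * 2 + (if bit == 1 then 1 else 0)) (0 : Int)
    let m := [b4, b5, b6, b7, b8].foldl (fun m bit => m * 2 + (if bit == 1 then 1 else 0)) (0 : Int)
    if m > 9 then PySem.Int.toStr h ++ ":" ++ PySem.Int.toStr m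
    else PySem.Int.toStr h ++ ":0" ++ PySem.Int.toStr m
  | _ => ""

-- ===== PRECONDITION & SPEC =====
-- A indexes the first nine elements, so it raises IndexError on lists shorter than 9; exactly those are excluded (B raises ValueError there, at the unpacking).
def Pre_bitToDec (bits : List Int) : Prop := 9 ≤ bits.length
instance (bits : List Int) : Decidable (Pre_bitToDec bits) := by unfold Pre_bitToDec; infer_instance
def pvWitness_bitToDec : List Int := [1, 0, 1, 0, 1, 1, 0, 1, 0]

def Spec_bitToDec (bits : List Int) (out : String) : Prop := out = bitToDec_alt bits
instance (bits : List Int) (out : String) : Decidable (Spec_bitToDec bits out) := by unfold Spec_bitToDec; infer_instance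

-- ===== CLAIM (what is proved, stated in full; the proofs are below) =====
def Claim_equal_bitToDec : Prop := ∀ (bits : List Int), Dom_bitToDec bits → Pre_bitToDec bits → Spec_bitToDec bits (bitToDec bits)

-- ===== LEMMAS AND PROOFS =====
lemma fmt_congr (hA mA hB mB : Int) (e1 : hA = hB) (e2 : mA = mB) :
    (if 9 < mA then PySem.Int.toStr hA ++ ":" ++ PySem.Int.toStr mA
     else PySem.Int.toStr hA ++ ":0" ++ PySem.Int.toStr mA)
    = (if 9 < mB then PySem.Int.toStr hB ++ ":" ++ PySem.Int.toStr mB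
       else PySem.Int.toStr hB ++ ":0" ++ PySem.Int.toStr mB) := by rw [e1, e2]

set_option maxHeartbeats 1000000 in
lemma bitToDec_eq_alt_cons9 (b0 b1 b2 b3 b4 b5 b6 b7 b8 : Int) (rest : List Int) :
    bitToDec (b0::b1::b2::b3::b4::b5::b6::b7::b8::rest)
    = bitToDec_alt (b0::b1::b2::b3::b4::b5::b6::b7::b8::rest) := by
  simp only [bitToDec, bitToDec_alt]
  rw [show PySem.List.pyRange 0 4 1 = [0,1,2,3] from by decide,
      show PySem.List.pyRange 4 9 1 = [4,5,6,7,8] from by decide,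
      show (PySem.List.slice (b0::b1::b2::b3::b4::b5::b6::b7::b8::rest) none (some 9)) = [b0,b1,b2,b3,b4,b5,b6,b7,b8] from by
        rw [PySem.List.slice_to _ (by norm_num)]; rfl]
  have hlen : ∀ k : ℤ, k ≤ 8 → k ≤ ↑rest.length + 1 + 1 + 1 + 1 + 1 + 1 + 1 + 1 := by
    intro k hk; have := Int.natCast_nonneg rest.length; omega
  have g0 : (0:ℤ) ≤ ↑rest.length := Int.natCast_nonneg _
  have g1 : (0:ℤ) ≤ ↑rest.length + 1 := by omega
  have g2 : (0:ℤ) ≤ ↑rest.length + 1 + 1 := by omega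
  have g3 : (0:ℤ) ≤ ↑rest.length + 1 + 1 + 1 := by omega
  have g4 : (0:ℤ) ≤ ↑rest.length + 1 + 1 + 1 + 1 := by omega
  have g5 : (0:ℤ) ≤ ↑rest.length + 1 + 1 + 1 + 1 + 1 := by omega
  have g6 : (0:ℤ) ≤ ↑rest.length + 1 + 1 + 1 + 1 + 1 + 1 := by omega
  have g7 : (0:ℤ) ≤ ↑rest.length + 1 + 1 + 1 + 1 + 1 + 1 + 1 := by omega
  norm_num [List.foldl, g0, g1, g2, g3, g4, g5, g6, g7, hlen 0 (by norm_num), hlen 1 (by norm_num),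
    hlen 2 (by norm_num), hlen 3 (by norm_num), hlen 4 (by norm_num), hlen 5 (by norm_num),
    hlen 6 (by norm_num), hlen 7 (by norm_num), hlen 8 (by norm_num),
    show Int.toNat 8 = 8 from rfl, show Int.toNat 7 = 7 from rfl, show Int.toNat 6 = 6 from rfl,
    show Int.toNat 5 = 5 from rfl, show Int.toNat 4 = 4 from rfl, show Int.toNat 3 = 3 from rfl,
    show Int.toNat 2 = 2 from rfl, Int.toNat_one, Int.toNat_zero, Option.bind_some,
    List.getElem_cons_zero, List.getElem_cons_succ, PySem.List.pyGetD, PySem.List.pyGet?, PySem.List.pyIdx?]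
  exact fmt_congr _ _ _ _ (by split_ifs <;> norm_num) (by split_ifs <;> norm_num)

-- ===== VERDICT (by name: the statement is the Claim_ definition above) =====
theorem bitToDec_spec : Claim_equal_bitToDec := by
  intro bits _ pre
  rcases bits with _ | ⟨b0, _ | ⟨b1, _ | ⟨b2, _ | ⟨b3, _ | ⟨b4, _ | ⟨b5, _ | ⟨b6, _ | ⟨b7, _ | ⟨b8, rest⟩⟩⟩⟩⟩⟩⟩⟩⟩ <;>
    simp only [Pre_bitToDec, List.length_nil, List.length_cons] at pre <;> try omega
  exact bitToDec_eq_alt_cons9 b0 b1 b2 b3 b4 b5 b6 b7 b8 rest
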